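-- pv_equiv track=rewrite | github.com/anader36/Programming-and-Algorithm-II-----Coursework-I-----Ahmed-Hanafy-----202000355 | final-rainbowgen-hashtables.py | reduce_hash
-- ===== SOURCE A (Python) =====
-- import string
--
-- def reduce_hash(hash_string: str, iteration: int, alphabet: str = string.printable, word_length: int = 6) -> str:
--     # Reduce the hash value to a number and add the iteration count
--     value = (int(hash_string, 16) + iteration) % (2 ** 40)
--     result = []
--     # Convert the number to a password by selecting characters from the alphabet
--     for i in range(word_length):
--     # Getting modulo by alphabet length. Result number will be between 0 and len(alphabet).
--         mod = value % len(alphabet)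
--     # Dividing value by alphabet length.
--         value //= len(alphabet)
--     # Getting symbol from input alphabet by calculated value in range from 0 to len(alphabet).
--         result.append(alphabet[mod])
--     return "".join(result)
-- ===== SOURCE B (Python) =====
-- import string
--
-- def reduce_hash(hash_string: str, iteration: int, alphabet: str = string.printable, word_length: int = 6) -> str:
--     # Divide and conquer: split the k requested digits into a low and a high
--     # half with a single divmod by base**(k//2) and recurse on each half,
--     # instead of extracting digits one by one with a mutating loop.
--     value = (int(hash_string, 16) + iteration) % (2 ** 40)
--     base = len(alphabet)
--
--     def to_digits(v, k):
--         # the k base-`base` digits of v, least significant first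
--         if k <= 0:
--             return ""
--         if k == 1:
--             return alphabet[v % base]
--         half = k // 2
--         hi, lo = divmod(v, base ** half)
--         return to_digits(lo, half) + to_digits(hi, k - half)
--
--     return to_digits(value, word_length)
-- ===== Notes on version B (the rewrite author's own statement) =====
-- stated objective: alternative
-- what changed: A extracts the word_length password characters one by one with a loop that mutates value via value //= len(alphabet); B is a divide-and-conquer recursion: a single divmod by base**(k//2) splits the requested k digits into a low and a high half, each produced recursively, and the halves are concatenated.
import Mathlib
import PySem

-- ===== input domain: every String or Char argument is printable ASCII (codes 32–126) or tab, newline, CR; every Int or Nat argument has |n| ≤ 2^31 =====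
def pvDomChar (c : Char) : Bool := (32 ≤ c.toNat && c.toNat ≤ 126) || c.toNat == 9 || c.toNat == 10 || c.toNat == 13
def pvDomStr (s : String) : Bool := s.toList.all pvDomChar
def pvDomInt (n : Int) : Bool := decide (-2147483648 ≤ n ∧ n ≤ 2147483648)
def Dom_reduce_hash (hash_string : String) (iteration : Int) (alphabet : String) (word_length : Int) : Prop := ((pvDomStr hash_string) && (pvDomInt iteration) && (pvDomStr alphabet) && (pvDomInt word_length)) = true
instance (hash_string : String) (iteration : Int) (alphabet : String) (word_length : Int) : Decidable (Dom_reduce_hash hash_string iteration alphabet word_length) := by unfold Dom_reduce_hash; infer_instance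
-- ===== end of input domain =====

-- B replaces A's linear digit loop (value //= len(alphabet) per position) by a
-- divide-and-conquer recursion: one divmod by base**(k//2) splits the k digits into
-- a low and a high half, each produced recursively; same result, alternative algorithm.


-- ===== PORT A =====
-- literal port of A: value = (int(hash_string,16)+iteration) % 2**40, then a loop
-- mutating (value, result): mod = value % L; value //= L; result.append(alphabet[mod]).
def reduce_hash (hash_string : String) (iteration : Int) (alphabet : String) (word_length : Int) : String :=
  let value0 : Int := PySem.Int.mod ((PySem.Int.ofStrBase? hash_string 16).getD 0 + iteration) (2 ^ 40)
  let st := (PySem.List.pyRange 0 word_length 1).foldl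
    (fun (st : Int × List Char) (_ : Int) =>
      let m := PySem.Int.mod st.1 (PySem.Str.len alphabet)
      let v := PySem.Int.floordiv st.1 (PySem.Str.len alphabet)
      (v, st.2 ++ [PySem.List.pyGetD alphabet.toList m ' ']))
    (value0, [])
  String.mk st.2

-- ===== PORT B =====
-- literal port of B's recursive helper to_digits(v, k):
--   k <= 0 -> ""; k == 1 -> alphabet[v % base];
--   else half = k//2; hi, lo = divmod(v, base**half); to_digits(lo,half) + to_digits(hi,k-half)
-- (k is carried as a Nat: the entry point passes word_length.toNat, which is 0 exactly
--  on the k <= 0 inputs where the Python helper returns "")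
def rhDigits (al : List Char) (base v : Int) (k : Nat) : List Char :=
  if k = 0 then []
  else if k = 1 then [PySem.List.pyGetD al (PySem.Int.mod v base) ' ']
  else
    let half := k / 2
    rhDigits al base (PySem.Int.mod v (base ^ half)) half
      ++ rhDigits al base (PySem.Int.floordiv v (base ^ half)) (k - half)
termination_by k
decreasing_by all_goals omega

def reduce_hash_alt (hash_string : String) (iteration : Int) (alphabet : String) (word_length : Int) : String :=
  let value : Int := PySem.Int.mod ((PySem.Int.ofStrBase? hash_string 16).getD 0 + iteration) (2 ^ 40)
  let base : Int := PySem.Str.len alphabet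
  String.mk (rhDigits alphabet.toList base value word_length.toNat)

-- ===== PRECONDITION & SPEC =====
-- Pre_ excludes exactly where A raises: int(hash_string,16) fails (ValueError),
-- or the alphabet is empty while the loop runs (ZeroDivisionError).
def Pre_reduce_hash (hash_string : String) (iteration : Int) (alphabet : String) (word_length : Int) : Prop :=
  (PySem.Int.ofStrBase? hash_string 16).isSome = true ∧ (0 < word_length → 0 < PySem.Str.len alphabet)
instance (hash_string : String) (iteration : Int) (alphabet : String) (word_length : Int) : Decidable (Pre_reduce_hash hash_string iteration alphabet word_length) := by unfold Pre_reduce_hash; infer_instance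
def pvWitness_reduce_hash : String × Int × String × Int := ("ff", 3, "ab", 4)
def Spec_reduce_hash (hash_string : String) (iteration : Int) (alphabet : String) (word_length : Int) (out : String) : Prop := out = reduce_hash_alt hash_string iteration alphabet word_length
instance (hash_string : String) (iteration : Int) (alphabet : String) (word_length : Int) (out : String) : Decidable (Spec_reduce_hash hash_string iteration alphabet word_length out) := by unfold Spec_reduce_hash; infer_instance

-- ===== CLAIM (what is proved, stated in full; the proofs are below) =====
def Claim_equal_reduce_hash : Prop := ∀ (hash_string : String) (iteration : Int) (alphabet : String) (word_length : Int), Dom_reduce_hash hash_string iteration alphabet word_length → Pre_reduce_hash hash_string iteration alphabet word_length → Spec_reduce_hash hash_string iteration alphabet word_length (reduce_hash hash_string iteration alphabet word_length)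

-- ===== LEMMAS AND PROOFS =====

-- running value after n iterations of A's loop is value0 / L^n
theorem rh_val (al : List Char) (L : Int) (hL : 0 < L) (n : Nat) (v : Int) (acc : List Char) :
    (((List.range n).foldl
      (fun (st : Int × List Char) (_ : Nat) =>
        (PySem.Int.floordiv st.1 L, st.2 ++ [PySem.List.pyGetD al (PySem.Int.mod st.1 L) ' ']))
      (v, acc))).1 = v / L ^ n := by
  induction n generalizing acc with
  | zero => simp
  | succ n ih =>
    rw [List.range_succ, List.foldl_append]
    simp only [List.foldl_cons, List.foldl_nil]
    rw [ih, PySem.Int.floordiv_eq_ediv_of_pos hL,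
      Int.ediv_ediv_of_nonneg (by positivity), pow_succ]

-- output list after n iterations of A's loop is the positional digits of v
theorem rh_out (al : List Char) (L : Int) (hL : 0 < L) (n : Nat) (v : Int) (acc : List Char) :
    (((List.range n).foldl
      (fun (st : Int × List Char) (_ : Nat) =>
        (PySem.Int.floordiv st.1 L, st.2 ++ [PySem.List.pyGetD al (PySem.Int.mod st.1 L) ' ']))
      (v, acc))).2
    = acc ++ (List.range n).map
        (fun i => PySem.List.pyGetD al (PySem.Int.mod (PySem.Int.floordiv v (L ^ i)) L) ' ') := by
  induction n generalizing acc with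
  | zero => simp
  | succ n ih =>
    rw [List.range_succ, List.foldl_append]
    simp only [List.foldl_cons, List.foldl_nil]
    rw [ih, rh_val al L hL, List.map_append, List.map_cons, List.map_nil, List.append_assoc]
    rw [PySem.Int.floordiv_eq_ediv_of_pos (b := L ^ n) (by positivity)]

-- a digit of the low half (v % L^h) agrees with the same digit of v, for i < h
theorem rh_low_digit (L v : Int) (hL : 0 < L) (i h : Nat) (hih : i < h) :
    (v % L ^ h) / L ^ i % L = v / L ^ i % L := by
  have hLi : (0 : Int) < L ^ i := by positivity
  have hsplit : v = L ^ h * (v / L ^ h) + v % L ^ h := (Int.ediv_add_emod v (L ^ h)).symm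
  have hpow : L ^ h = L ^ i * L ^ (h - i) := by rw [← pow_add]; congr 1; omega
  conv_rhs => rw [hsplit]
  rw [hpow, mul_assoc, Int.add_comm, Int.add_mul_ediv_left _ _ (ne_of_gt hLi)]
  have hdvd : (L : Int) ∣ L ^ (h - i) * (v / (L ^ i * L ^ (h - i))) :=
    Dvd.dvd.mul_right (dvd_pow_self L (by omega)) _
  obtain ⟨c, hc⟩ := hdvd
  rw [hc, mul_comm L c, Int.add_mul_emod_self_right]
theorem rhDigits_eq (al : List Char) (L : Int) (hL : 0 < L) :
    ∀ (k : Nat) (v : Int), 0 ≤ v →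
    rhDigits al L v k = (List.range k).map
      (fun i => PySem.List.pyGetD al (PySem.Int.mod (PySem.Int.floordiv v (L ^ i)) L) ' ') := by
  intro k
  induction k using Nat.strong_induction_on with
  | _ k ih =>
    intro v hv
    match k, ih with
    | 0, _ => rw [rhDigits]; simp
    | 1, _ =>
      rw [rhDigits]
      simp only [List.range_one, List.map_cons, List.map_nil]
      norm_num [PySem.Int.floordiv_eq_ediv_of_pos (b := (1:Int)) one_pos]
    | (n+2), ih =>
      rw [rhDigits]
      simp only [show ¬(n+2 = 0) by omega, show ¬(n+2 = 1) by omega, if_false]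
      have h2 : (2:Nat) ≤ n + 2 := by omega
      set k := n + 2 with hk
      set half := k / 2 with hhalf
      have hhalf1 : 1 ≤ half := by omega
      have hhalfk : half < k := by omega
      have hM : (0:Int) < L ^ half := by positivity
      have hlo : 0 ≤ PySem.Int.mod v (L ^ half) := PySem.Int.mod_nonneg v hM
      have hhi : 0 ≤ PySem.Int.floordiv v (L ^ half) := by
        rw [PySem.Int.floordiv_eq_ediv_of_pos hM]; exact Int.ediv_nonneg hv (le_of_lt hM)
      rw [ih half hhalfk _ hlo, ih (k - half) (by omega) _ hhi]
      have hrange : List.range k = List.range half ++ (List.range (k - half)).map (half + ·) := by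
        rw [← List.range_add]; congr 1; omega
      rw [hrange, List.map_append, List.map_map]
      congr 1
      · apply List.map_congr_left
        intro i hi
        rw [List.mem_range] at hi
        have hLi : (0:Int) < L ^ i := by positivity
        rw [PySem.Int.mod_eq_emod_of_pos hM, PySem.Int.floordiv_eq_ediv_of_pos hLi,
          PySem.Int.floordiv_eq_ediv_of_pos hLi,
          PySem.Int.mod_eq_emod_of_pos hL, PySem.Int.mod_eq_emod_of_pos hL,
          rh_low_digit L v hL i half hi]
      · apply List.map_congr_left
        intro j _
        simp only [Function.comp_apply]
        have hLj : (0:Int) < L ^ j := by positivity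
        have hLhj : (0:Int) < L ^ (half + j) := by positivity
        rw [PySem.Int.floordiv_eq_ediv_of_pos hM, PySem.Int.floordiv_eq_ediv_of_pos hLj,
          PySem.Int.floordiv_eq_ediv_of_pos hLhj,
          Int.ediv_ediv_of_nonneg (le_of_lt hM), ← pow_add]

-- ===== VERDICT (by name: the statement is the Claim_ definition above) =====
theorem reduce_hash_spec : Claim_equal_reduce_hash := by
  intro hash_string iteration alphabet word_length _ hPre
  rcases hPre with ⟨_, hL⟩
  by_cases hwl : 0 < word_length
  · have hLpos := hL hwl
    obtain ⟨n, rfl⟩ : ∃ n : Nat, word_length = (n : Int) := ⟨word_length.toNat, by omega⟩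
    simp only [Spec_reduce_hash, reduce_hash, reduce_hash_alt,
      PySem.List.pyRange_zero_natCast, List.foldl_map]
    rw [rh_out alphabet.toList (PySem.Str.len alphabet) hLpos]
    rw [Int.toNat_natCast,
      rhDigits_eq alphabet.toList (PySem.Str.len alphabet) hLpos n _
        (PySem.Int.mod_nonneg _ (by positivity))]
    simp only [List.nil_append]
  · have hle : word_length ≤ 0 := by omega
    simp only [Spec_reduce_hash, reduce_hash, reduce_hash_alt,
      PySem.List.pyRange_one_eq_nil hle, List.foldl_nil,
      Int.toNat_of_nonpos hle]
    rw [rhDigits]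
    simp
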